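-- pv_equiv track=rewrite | github.com/lcirvine/ipo_monitoring | entity_mapping.py | entity_id_to_iconum
-- ===== SOURCE A (Python) =====
-- def entity_id_to_iconum(entity_id: str):
--     chars = "0123456789BCDFGHJKLMNPQRSTVWXYZ"
--     temp_iconum = 0
--     for x in range(0, 6):
--         ss = entity_id[x]
--         char_index = chars.find(ss)
--         p = len(chars) ** (5 - x)
--         temp_iconum += p * char_index
--     return temp_iconum
-- ===== SOURCE B (Python) =====
-- def entity_id_to_iconum(entity_id: str):
--     chars = "0123456789BCDFGHJKLMNPQRSTVWXYZ"
--
--     def horner(x, acc):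
--         if x == 6:
--             return acc
--         return horner(x + 1, acc * 31 + chars.find(entity_id[x]))
--
--     return horner(0, 0)
-- ===== Notes on version B (the rewrite author's own statement) =====
-- stated objective: simpler
-- what changed: Replaces the iterative power-weighted summation (31**(5-x) recomputed each loop iteration) with a recursive Horner evaluation carrying one running accumulator multiplied by 31 per character, dropping the exponentiation entirely.
import Mathlib
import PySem

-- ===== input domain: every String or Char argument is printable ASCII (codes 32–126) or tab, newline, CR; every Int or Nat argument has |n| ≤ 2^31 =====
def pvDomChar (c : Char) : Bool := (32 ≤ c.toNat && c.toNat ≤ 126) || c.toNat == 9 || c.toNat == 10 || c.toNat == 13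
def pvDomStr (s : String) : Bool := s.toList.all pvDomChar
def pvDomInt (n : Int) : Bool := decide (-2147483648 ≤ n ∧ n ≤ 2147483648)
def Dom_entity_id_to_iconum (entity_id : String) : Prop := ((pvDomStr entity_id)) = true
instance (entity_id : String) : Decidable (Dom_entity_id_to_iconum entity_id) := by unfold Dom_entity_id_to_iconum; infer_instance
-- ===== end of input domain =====

-- B replaces A's per-position power-weighted summation (31^(5-x) recomputed each
-- iteration over range(6)) by a recursive Horner evaluation: one running accumulator
-- multiplied by 31 per character, no exponentiation. Objective: simpler.

-- ===== PORT A =====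
def entity_id_to_iconum (entity_id : String) : Int :=
  let chars := "0123456789BCDFGHJKLMNPQRSTVWXYZ"
  (PySem.List.pyRange 0 6 1).foldl (fun temp_iconum x =>
    match PySem.Str.pyGet? entity_id x with
    | some ss =>
      let char_index := PySem.Str.find chars (String.ofList [ss])
      let p : Int := (PySem.Str.len chars) ^ ((5 - x).toNat)
      temp_iconum + p * char_index
    | none => temp_iconum) 0   -- none = IndexError; unreachable under Pre_

-- ===== PORT B =====
-- Source B's recursive helper 'horner(x, acc)'; the guard 'x == 6' is written '6 ≤ x' so the
-- recursion terminates on all Nat (for the calls Source B makes, x ≤ 6, they coincide).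
def entity_id_to_iconum_horner (entity_id chars : String) (x : Nat) (acc : Int) : Int :=
  if 6 ≤ x then acc
  else
    match PySem.Str.pyGet? entity_id (x : Int) with
    | some c => entity_id_to_iconum_horner entity_id chars (x + 1) (acc * 31 + PySem.Str.find chars (String.ofList [c]))
    | none => acc   -- none = IndexError; unreachable under Pre_
termination_by 6 - x

def entity_id_to_iconum_alt (entity_id : String) : Int :=
  let chars := "0123456789BCDFGHJKLMNPQRSTVWXYZ"
  entity_id_to_iconum_horner entity_id chars 0 0

-- ===== PRECONDITION & SPEC =====
-- A indexes entity_id[x] for x in range(6): it raises IndexError on strings shorter than 6.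
def Pre_entity_id_to_iconum (entity_id : String) : Prop := 6 ≤ entity_id.toList.length
instance (entity_id : String) : Decidable (Pre_entity_id_to_iconum entity_id) := by unfold Pre_entity_id_to_iconum; infer_instance
def pvWitness_entity_id_to_iconum : String := "0C43LL"

def Spec_entity_id_to_iconum (entity_id : String) (out : Int) : Prop := out = entity_id_to_iconum_alt entity_id
instance (entity_id : String) (out : Int) : Decidable (Spec_entity_id_to_iconum entity_id out) := by unfold Spec_entity_id_to_iconum; infer_instance

-- ===== CLAIM (what is proved, stated in full; the proofs are below) =====
def Claim_equal_entity_id_to_iconum : Prop := ∀ (entity_id : String), Dom_entity_id_to_iconum entity_id → Pre_entity_id_to_iconum entity_id → Spec_entity_id_to_iconum entity_id (entity_id_to_iconum entity_id)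

-- ===== LEMMAS AND PROOFS =====
set_option maxHeartbeats 1200000 in
theorem entity_id_to_iconum_key (s : String) (c0 c1 c2 c3 c4 c5 : Char) (t : List Char)
    (h : s.toList = c0 :: c1 :: c2 :: c3 :: c4 :: c5 :: t) :
    entity_id_to_iconum s = entity_id_to_iconum_alt s := by
  simp [entity_id_to_iconum, entity_id_to_iconum_alt, entity_id_to_iconum_horner, pysem, h]
  ring

-- ===== VERDICT (by name: the statement is the Claim_ definition above) =====
theorem entity_id_to_iconum_spec : Claim_equal_entity_id_to_iconum := by
  intro s _ hpre
  unfold Spec_entity_id_to_iconum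
  unfold Pre_entity_id_to_iconum at hpre
  rcases hl : s.toList with _ | ⟨c0, _ | ⟨c1, _ | ⟨c2, _ | ⟨c3, _ | ⟨c4, _ | ⟨c5, t⟩⟩⟩⟩⟩⟩ <;>
    simp [hl] at hpre
  exact entity_id_to_iconum_key s c0 c1 c2 c3 c4 c5 t hl
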